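-- pv_equiv track=rewrite | github.com/sergeygrigorev/Truth-Table-Builder | truthtable.py | make_pretty
-- ===== SOURCE A (Python) =====
-- def make_pretty(s):
--     s = ''.join([x for x in s if x != ' '])
--     res = ''
--     for i in range(len(s)-1):
--         res += s[i]
--         if (
--             s[i] == '(' or
--             s[i+1] == ')' or
--             s[i] == '<' or
--             s[i] == '-' or
--             s[i] == '!'
--             ): continue
--         res += ' '
--     return res+s[-1]
-- ===== SOURCE B (Python) =====
-- def make_pretty(s):
--     # Two-phase: put a space at every boundary, then delete the unwanted ones.
--     t = ' '.join(s.replace(' ', ''))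
--     for pat, rep in (('( ', '('), ('< ', '<'), ('- ', '-'), ('! ', '!'), (' )', ')')):
--         t = t.replace(pat, rep)
--     return t
-- ===== Notes on version B (the rewrite author's own statement) =====
-- stated objective: faster
-- what changed: A strips spaces and then builds the result with string += in an indexed loop, peeking at the next character to decide each separator; B instead space-joins all characters in one pass and then deletes the unwanted separators with five str.replace passes, one per no-space rule.
-- crash fix: On strings consisting solely of spaces (including the empty string) A raises IndexError at s[-1]; B returns the empty string. — e.g. on make_pretty(" "): A raises IndexError, B returns ""
import Mathlib
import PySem

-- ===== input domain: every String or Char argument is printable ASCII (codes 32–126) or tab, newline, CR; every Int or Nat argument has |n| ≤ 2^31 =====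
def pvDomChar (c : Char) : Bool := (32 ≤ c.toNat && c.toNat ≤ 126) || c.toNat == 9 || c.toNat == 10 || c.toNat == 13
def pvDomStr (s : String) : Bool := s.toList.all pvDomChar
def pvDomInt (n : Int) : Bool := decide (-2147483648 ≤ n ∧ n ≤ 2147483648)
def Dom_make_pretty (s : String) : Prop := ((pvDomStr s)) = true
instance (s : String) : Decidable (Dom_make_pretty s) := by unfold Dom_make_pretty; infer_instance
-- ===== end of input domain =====

-- B rebuilds the spacing in two phases (a space at every boundary, then delete the unwanted
-- ones with str.replace) instead of A's indexed accumulating loop; objective: faster (measured).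

-- ===== PORT A =====
-- loop body of A: res += s[i]; if s[i]=='(' or s[i+1]==')' or s[i]=='<' or s[i]=='-' or s[i]=='!': continue; res += ' '
def pvStepA (cs : List Char) (res : List Char) (i : Int) : List Char :=
  let res := res ++ ((PySem.List.pyGet? cs i).map (fun c => [c])).getD []
  if ((PySem.List.pyGet? cs i).getD ' ') = '(' ∨
     ((PySem.List.pyGet? cs (i + 1)).getD ' ') = ')' ∨
     ((PySem.List.pyGet? cs i).getD ' ') = '<' ∨
     ((PySem.List.pyGet? cs i).getD ' ') = '-' ∨
     ((PySem.List.pyGet? cs i).getD ' ') = '!'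
  then res
  else res ++ [' ']

def make_pretty (s : String) : String :=
  -- s = ''.join([x for x in s if x != ' '])
  let cs : List Char := s.toList.filter (fun x => x != ' ')
  -- res = ''; for i in range(len(s)-1): …
  let res : List Char :=
    (PySem.List.pyRange 0 ((cs.length : Int) - 1) 1).foldl (pvStepA cs) []
  -- return res + s[-1]   (s[-1] raises IndexError on the empty string: excluded by Pre_)
  String.ofList (res ++ (((PySem.List.pyGet? cs (-1)).map (fun c => [c])).getD []))

-- ===== PORT B =====
def make_pretty_alt (s : String) : String :=
  -- t = ' '.join(s.replace(' ', ''))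
  let t0 : List Char :=
    PySem.Chars.join [' '] ((PySem.Chars.replace s.toList [' '] []).map (fun c => [c]))
  -- the four "drop the space after (,<,-,!" passes and the "drop the space before )" pass
  let t1 := PySem.Chars.replace t0 ['(', ' '] ['(']
  let t2 := PySem.Chars.replace t1 ['<', ' '] ['<']
  let t3 := PySem.Chars.replace t2 ['-', ' '] ['-']
  let t4 := PySem.Chars.replace t3 ['!', ' '] ['!']
  let t5 := PySem.Chars.replace t4 [' ', ')'] [')']
  String.ofList t5

-- ===== PRECONDITION & SPEC =====
-- Pre_ excludes exactly the strings with no non-space character, on which A's s[-1] raises IndexError.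
def Pre_make_pretty (s : String) : Prop := s.toList.filter (fun x => x != ' ') ≠ []
instance (s : String) : Decidable (Pre_make_pretty s) := by unfold Pre_make_pretty; infer_instance
def pvWitness_make_pretty : String := "a<b"

-- A raises IndexError on strings consisting solely of spaces (including ""); B returns "" there.
def Raises_make_pretty (s : String) : Prop := s.toList.all (fun c => c == ' ') = true
instance (s : String) : Decidable (Raises_make_pretty s) := by unfold Raises_make_pretty; infer_instance
def pvRaiseWitness_make_pretty : String := " "
def pvRaiseWitnessOut_make_pretty : String := ""

def Spec_make_pretty (s : String) (out : String) : Prop := out = make_pretty_alt s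
instance (s : String) (out : String) : Decidable (Spec_make_pretty s out) := by unfold Spec_make_pretty; infer_instance

-- ===== CLAIM (what is proved, stated in full; the proofs are below) =====
def Claim_equal_make_pretty : Prop := ∀ (s : String), Dom_make_pretty s → Pre_make_pretty s → Spec_make_pretty s (make_pretty s)
def Claim_raises_make_pretty : Prop := (∀ (s : String), Dom_make_pretty s → Raises_make_pretty s → ¬ Pre_make_pretty s) ∧ (Dom_make_pretty (pvRaiseWitness_make_pretty) ∧ Raises_make_pretty (pvRaiseWitness_make_pretty) ∧ make_pretty_alt (pvRaiseWitness_make_pretty) = pvRaiseWitnessOut_make_pretty)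

-- ===== LEMMAS AND PROOFS =====

-- the common value of both programs: A's per-boundary rule as a structural recursion
def pvGoA : List Char → List Char
  | [] => []
  | [c] => [c]
  | a :: b :: t =>
      a :: ((if a = '(' ∨ b = ')' ∨ a = '<' ∨ a = '-' ∨ a = '!' then [] else [' ']) ++ pvGoA (b :: t))

-- "spaced string" model for B's replace passes: (char, does-a-space-follow) pairs
def pvPairs : List Char → List (Char × Bool)
  | [] => []
  | [c] => [(c, false)]
  | c :: t => (c, true) :: pvPairs t

def pvRender : List (Char × Bool) → List Char
  | [] => []
  | (c, b) :: t => c :: ((if b then [' '] else []) ++ pvRender t)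

def pvWF : List (Char × Bool) → Prop
  | [] => True
  | (c, b) :: t => c ≠ ' ' ∧ (t = [] → b = false) ∧ pvWF t

def pvMapL (a : Char) (L : List (Char × Bool)) : List (Char × Bool) :=
  L.map (fun p => (p.1, p.2 && !(p.1 == a)))

def pvMapR : List (Char × Bool) → List (Char × Bool)
  | [] => []
  | [p] => [p]
  | (c, b) :: (d, b') :: t => (c, b && !(d == ')')) :: pvMapR ((d, b') :: t)

def pvHead : List (Char × Bool) → Char
  | [] => 'x'
  | (c, _) :: _ => c

theorem pvRender_cons (c : Char) (b : Bool) (t : List (Char × Bool)) :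
    pvRender ((c, b) :: t) = c :: ((if b then [' '] else []) ++ pvRender t) := rfl

theorem pvMapL_cons (a c : Char) (b : Bool) (t : List (Char × Bool)) :
    pvMapL a ((c, b) :: t) = (c, b && !(c == a)) :: pvMapL a t := rfl

-- unfolding lemmas for PySem.Chars.replace.go
theorem pvGoZero (old new l acc : List Char) :
    PySem.Chars.replace.go old new 0 l acc = acc.reverse ++ l := by
  rw [PySem.Chars.replace.go]

theorem pvGoNil (old new acc : List Char) (fuel : Nat) :
    PySem.Chars.replace.go old new fuel [] acc = acc.reverse := by
  cases fuel with
  | zero => rw [pvGoZero]; simp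
  | succ f => rw [PySem.Chars.replace.go]; simp

theorem pvGoCons (old new acc t : List Char) (c : Char) (fuel : Nat) :
    PySem.Chars.replace.go old new (fuel + 1) (c :: t) acc =
      if old.isPrefixOf (c :: t) then
        PySem.Chars.replace.go old new fuel ((c :: t).drop old.length) (new.reverse ++ acc)
      else PySem.Chars.replace.go old new fuel t (c :: acc) := by
  rw [PySem.Chars.replace.go]

-- s.replace(' ', '') is the space filter
theorem pvStripGo (l : List Char) : ∀ (fuel : Nat) (acc : List Char), l.length ≤ fuel →
    PySem.Chars.replace.go [' '] [] fuel l acc = acc.reverse ++ l.filter (fun x => x != ' ') := by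
  induction l with
  | nil => intro fuel acc _; simp [pvGoNil]
  | cons c t ih =>
      intro fuel acc hf
      cases fuel with
      | zero => simp at hf
      | succ f =>
          rw [pvGoCons]
          by_cases hc : c = ' '
          · subst hc
            simp [List.isPrefixOf, ih f acc (by simpa using hf)]
          · have h1 : ([' '].isPrefixOf (c :: t)) = false := by
              simp [List.isPrefixOf]; exact fun h => (hc h.symm).elim
            rw [h1]
            simp only [Bool.false_eq_true, if_false]
            rw [ih f (c :: acc) (by simpa using hf)]
            simp [hc]

theorem pvStrip (l : List Char) :
    PySem.Chars.replace l [' '] [] = l.filter (fun x => x != ' ') := by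
  show PySem.Chars.replace.go [' '] [] l.length l [] = _
  simpa using pvStripGo l l.length [] le_rfl

-- ' '.join of the characters renders the all-spaces pair list
theorem pvJoin : ∀ cs : List Char,
    PySem.Chars.join [' '] (cs.map (fun c => [c])) = pvRender (pvPairs cs)
  | [] => by simp [PySem.Chars.join, pvPairs, pvRender, List.intercalate]
  | [c] => by simp [PySem.Chars.join, pvPairs, pvRender, List.intercalate]
  | a :: b :: t => by
      have ih := pvJoin (b :: t)
      rw [show pvPairs (a :: b :: t) = (a, true) :: pvPairs (b :: t) from rfl, pvRender_cons]
      rw [← ih]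
      simp [PySem.Chars.join, List.intercalate, List.intersperse_cons₂]

-- non-emptiness helpers
theorem pvPairs_ne_nil : ∀ {cs : List Char}, cs ≠ [] → pvPairs cs ≠ []
  | [], h => absurd rfl h
  | [c], _ => by simp [pvPairs]
  | a :: b :: t, _ => by simp [pvPairs]

theorem pvMapL_ne_nil (a : Char) {L : List (Char × Bool)} (h : L ≠ []) : pvMapL a L ≠ [] := by
  cases L with
  | nil => exact absurd rfl h
  | cons p t => rcases p with ⟨c, b⟩; simp [pvMapL_cons]

theorem pvMapR_ne_nil : ∀ {L : List (Char × Bool)}, L ≠ [] → pvMapR L ≠ []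
  | [], h => absurd rfl h
  | [p], _ => by simp [pvMapR]
  | (c, b) :: (d, b') :: t, _ => by simp [pvMapR]

-- well-formedness is preserved by all the passes
theorem pvWF_pairs : ∀ cs : List Char, (∀ c ∈ cs, c ≠ ' ') → pvWF (pvPairs cs)
  | [] => by intro _; trivial
  | [c] => by
      intro h
      exact ⟨h c (by simp), fun _ => rfl, trivial⟩
  | a :: b :: t => by
      intro h
      refine ⟨h a (by simp), fun hn => absurd hn (pvPairs_ne_nil (by simp)), ?_⟩
      exact pvWF_pairs (b :: t) (fun c hc => h c (List.mem_cons_of_mem a hc))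

theorem pvWF_mapL (a : Char) : ∀ L, pvWF L → pvWF (pvMapL a L)
  | [] => by intro _; trivial
  | (c, b) :: t => by
      intro h
      obtain ⟨hc, hbn, ht⟩ := h
      rw [pvMapL_cons]
      refine ⟨hc, ?_, pvWF_mapL a t ht⟩
      intro hmt
      cases t with
      | nil => rw [hbn rfl]; rfl
      | cons q u => exact absurd hmt (pvMapL_ne_nil a (by simp))

theorem pvWF_mapR : ∀ L, pvWF L → pvWF (pvMapR L)
  | [] => by intro _; trivial
  | [(c, b)] => by intro h; simpa [pvMapR] using h
  | (c, b) :: (d, b') :: t => by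
      intro h
      obtain ⟨hc, _, ht⟩ := h
      have ih := pvWF_mapR ((d, b') :: t) ht
      exact ⟨hc, fun hn => absurd hn (pvMapR_ne_nil (by simp)), ih⟩

-- the "remove the space after a" pass on a rendered spaced string
theorem pvGoL (a : Char) (ha : a ≠ ' ') :
    ∀ (L : List (Char × Bool)), pvWF L → ∀ (fuel : Nat) (acc : List Char),
      (pvRender L).length ≤ fuel →
      PySem.Chars.replace.go [a, ' '] [a] fuel (pvRender L) acc
        = acc.reverse ++ pvRender (pvMapL a L) := by
  intro L
  induction L with
  | nil => intro _ fuel acc _; simp [pvRender, pvMapL, pvGoNil]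
  | cons p rest ih =>
      rcases p with ⟨c, b⟩
      intro hwf fuel acc hf
      obtain ⟨hc, hbn, hwfr⟩ := hwf
      cases rest with
      | nil =>
          have hb : b = false := hbn rfl
          subst hb
          have hr : pvRender [(c, false)] = [c] := by simp [pvRender]
          rw [hr] at hf ⊢
          cases fuel with
          | zero => simp at hf
          | succ f =>
              rw [pvGoCons]
              rw [if_neg (by simp [List.isPrefixOf])]
              rw [pvGoNil]
              simp [pvMapL, pvRender]
      | cons q rest' =>
          rcases q with ⟨d, b'⟩
          have hd : d ≠ ' ' := hwfr.1
          obtain ⟨u, hu⟩ : ∃ u, pvRender ((d, b') :: rest') = d :: u := ⟨_, rfl⟩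
          cases b with
          | false =>
              have hr : pvRender ((c, false) :: (d, b') :: rest')
                  = c :: pvRender ((d, b') :: rest') := by simp [pvRender_cons]
              rw [hr] at hf ⊢
              cases fuel with
              | zero => simp at hf
              | succ f =>
                  rw [pvGoCons, hu]
                  rw [if_neg (by
                    simp [List.isPrefixOf]
                    intro _ h'; exact hd h'.symm)]
                  rw [← hu, ih hwfr f (c :: acc) (by simp at hf; omega)]
                  simp [pvMapL_cons, pvRender_cons]
          | true =>
              have hr : pvRender ((c, true) :: (d, b') :: rest')
                  = c :: ' ' :: pvRender ((d, b') :: rest') := by simp [pvRender_cons]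
              rw [hr] at hf ⊢
              cases fuel with
              | zero => simp at hf
              | succ f =>
                  rw [pvGoCons]
                  by_cases hca : c = a
                  · subst hca
                    rw [if_pos (by simp [List.isPrefixOf])]
                    rw [show (((c :: ' ' :: pvRender ((d, b') :: rest')).drop ([c, ' '].length)))
                          = pvRender ((d, b') :: rest') from rfl]
                    rw [ih hwfr f ([c].reverse ++ acc) (by simp at hf ⊢; omega)]
                    simp [pvMapL_cons, pvRender_cons]
                  · rw [if_neg (by
                      simp [List.isPrefixOf]
                      intro h'; exact (hca h'.symm).elim)]
                    cases f with
                    | zero => simp at hf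
                    | succ f' =>
                        rw [pvGoCons, hu]
                        rw [if_neg (by
                          simp [List.isPrefixOf]
                          intro h'; exact (ha h').elim)]
                        rw [← hu, ih hwfr f' (' ' :: c :: acc) (by simp at hf ⊢; omega)]
                        simp [pvMapL_cons, pvRender_cons, hca]

-- rendering after the right pass, head exposed
theorem pvRenderMapRCons (d : Char) (b' : Bool) (rest : List (Char × Bool)) :
    pvRender (pvMapR ((d, b') :: rest))
      = d :: ((if b' && !(pvHead rest == ')') then [' '] else []) ++ pvRender (pvMapR rest)) := by
  cases rest with
  | nil => simp [pvMapR, pvRender, pvHead]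
  | cons q u =>
      rcases q with ⟨e, be⟩
      simp [pvMapR, pvRender_cons, pvHead]

-- the "remove the space before )" pass on a rendered spaced string (flagged form)
theorem pvGoR :
    ∀ (L : List (Char × Bool)), pvWF L → ∀ (b : Bool) (fuel : Nat) (acc : List Char),
      (b = true → L ≠ []) →
      ((if b then [' '] else []) ++ pvRender L).length ≤ fuel →
      PySem.Chars.replace.go [' ', ')'] [')'] fuel ((if b then [' '] else []) ++ pvRender L) acc
        = acc.reverse ++ ((if b && !(pvHead L == ')') then [' '] else []) ++ pvRender (pvMapR L)) := by
  intro L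
  induction L with
  | nil =>
      intro _ b fuel acc hb _
      cases b with
      | false => simp [pvRender, pvMapR, pvGoNil]
      | true => exact absurd rfl (fun h => (hb h) rfl)
  | cons p rest ih =>
      rcases p with ⟨d, b'⟩
      intro hwf b fuel acc _ hf
      obtain ⟨hd, hbn, hwfr⟩ := hwf
      have hflag : b' = true → rest ≠ [] := by
        intro hb' hn
        rw [hbn hn] at hb'; cases hb'
      have hr : pvRender ((d, b') :: rest) = d :: ((if b' then [' '] else []) ++ pvRender rest) :=
        pvRender_cons d b' rest
      have Hfalse : ∀ (fuel : Nat) (acc : List Char), (pvRender ((d, b') :: rest)).length ≤ fuel →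
          PySem.Chars.replace.go [' ', ')'] [')'] fuel (pvRender ((d, b') :: rest)) acc
            = acc.reverse ++ pvRender (pvMapR ((d, b') :: rest)) := by
        intro fuel acc hf
        rw [hr] at hf ⊢
        cases fuel with
        | zero => simp at hf
        | succ f =>
            rw [pvGoCons]
            rw [if_neg (by
              simp [List.isPrefixOf]
              intro h'; exact (hd h'.symm).elim)]
            have := ih hwfr b' f (d :: acc) hflag (by simp at hf ⊢; omega)
            rw [this, pvRenderMapRCons]
            simp
      cases b with
      | false =>
          simpa using Hfalse fuel acc (by simpa using hf)
      | true =>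
          rw [hr] at hf ⊢
          simp only [if_true, List.singleton_append] at hf ⊢
          cases fuel with
          | zero => simp at hf
          | succ f =>
              rw [pvGoCons]
              by_cases hdp : d = ')'
              · subst hdp
                cases hb' : b' with
                | true =>
                    rw [if_pos (by simp [List.isPrefixOf])]
                    rw [show ((' ' :: ')' :: ((if true then [' '] else []) ++ pvRender rest)).drop ([' ', ')'].length))
                          = (if true then [' '] else []) ++ pvRender rest from rfl]
                    have := ih hwfr true f ([')'].reverse ++ acc) (fun _ => hflag hb') (by simp at hf ⊢; omega)
                    rw [this, pvRenderMapRCons]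
                    simp [pvHead]
                | false =>
                    rw [if_pos (by simp [List.isPrefixOf])]
                    rw [show ((' ' :: ')' :: ((if false then [' '] else []) ++ pvRender rest)).drop ([' ', ')'].length))
                          = (if false then [' '] else []) ++ pvRender rest from rfl]
                    have := ih hwfr false f ([')'].reverse ++ acc) (by simp) (by simp at hf ⊢; omega)
                    rw [this, pvRenderMapRCons]
                    simp [pvHead]
              · rw [if_neg (by
                  simp [List.isPrefixOf]
                  intro h'; exact (hdp h'.symm).elim)]
                rw [← hr, Hfalse f (' ' :: acc) (by rw [hr]; simp at hf ⊢; omega)]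
                simp [pvHead, hdp]

-- replace on a rendered list, packaged
theorem pvReplaceL (a : Char) (ha : a ≠ ' ') (L : List (Char × Bool)) (h : pvWF L) :
    PySem.Chars.replace (pvRender L) [a, ' '] [a] = pvRender (pvMapL a L) := by
  show PySem.Chars.replace.go [a, ' '] [a] (pvRender L).length (pvRender L) [] = _
  simpa using pvGoL a ha L h (pvRender L).length [] le_rfl

theorem pvReplaceR (L : List (Char × Bool)) (h : pvWF L) :
    PySem.Chars.replace (pvRender L) [' ', ')'] [')'] = pvRender (pvMapR L) := by
  show PySem.Chars.replace.go [' ', ')'] [')'] (pvRender L).length (pvRender L) [] = _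
  have := pvGoR L h false (pvRender L).length [] (by simp) (by simp)
  simpa using this

-- heads
theorem pvHead_mapL (a : Char) (L : List (Char × Bool)) : pvHead (pvMapL a L) = pvHead L := by
  cases L with
  | nil => rfl
  | cons p t => rcases p with ⟨c, b⟩; rfl

theorem pvHead_pairs (b : Char) (t : List Char) : pvHead (pvPairs (b :: t)) = b := by
  cases t with
  | nil => rfl
  | cons x u => rfl

-- the composition of the five passes is exactly A's per-boundary rule
theorem pvChain : ∀ cs : List Char,
    pvRender (pvMapR (pvMapL '!' (pvMapL '-' (pvMapL '<' (pvMapL '(' (pvPairs cs)))))) = pvGoA cs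
  | [] => rfl
  | [c] => by simp [pvPairs, pvMapL, pvMapR, pvRender, pvGoA]
  | a :: b :: t => by
      have ih := pvChain (b :: t)
      rw [show pvPairs (a :: b :: t) = (a, true) :: pvPairs (b :: t) from rfl]
      rw [pvMapL_cons, pvMapL_cons, pvMapL_cons, pvMapL_cons]
      rw [pvRenderMapRCons]
      rw [ih]
      rw [pvHead_mapL, pvHead_mapL, pvHead_mapL, pvHead_mapL, pvHead_pairs]
      rw [show pvGoA (a :: b :: t)
            = a :: ((if a = '(' ∨ b = ')' ∨ a = '<' ∨ a = '-' ∨ a = '!' then [] else [' ']) ++ pvGoA (b :: t)) from rfl]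
      congr 1
      by_cases h : a = '(' ∨ b = ')' ∨ a = '<' ∨ a = '-' ∨ a = '!'
      · rcases h with h | h | h | h | h <;> simp [h]
      · have h1 : ¬ a = '(' := fun hx => h (Or.inl hx)
        have h2 : ¬ b = ')' := fun hx => h (Or.inr (Or.inl hx))
        have h3 : ¬ a = '<' := fun hx => h (Or.inr (Or.inr (Or.inl hx)))
        have h4 : ¬ a = '-' := fun hx => h (Or.inr (Or.inr (Or.inr (Or.inl hx))))
        have h5 : ¬ a = '!' := fun hx => h (Or.inr (Or.inr (Or.inr (Or.inr hx))))
        simp [h1, h2, h3, h4, h5]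
  termination_by cs => cs.length

-- A's indexed loop computes pvGoA on the suffix
theorem pvLoopA (cs : List Char) :
    ∀ (n k : Nat) (acc : List Char), k < cs.length → n = cs.length - 1 - k →
      ((PySem.List.pyRange (k : Int) ((cs.length : Int) - 1) 1).foldl (pvStepA cs) acc)
        ++ (((PySem.List.pyGet? cs (-1)).map (fun c => [c])).getD [])
      = acc ++ pvGoA (cs.drop k) := by
  intro n
  induction n with
  | zero =>
      intro k acc hk hn
      have hne : cs ≠ [] := by intro h; rw [h] at hk; simp at hk
      have hk1 : k = cs.length - 1 := by omega
      have hnil : PySem.List.pyRange (k : Int) ((cs.length : Int) - 1) 1 = [] := by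
        apply PySem.List.pyRange_one_eq_nil
        omega
      rw [hnil]
      rw [PySem.List.pyGet?_neg_one cs]
      have hdrop : cs.drop k = [cs.getLast hne] := by
        subst hk1
        exact List.drop_length_sub_one hne
      rw [hdrop, List.getLast?_eq_getLast hne]
      simp [pvGoA]
  | succ n ihn =>
      intro k acc hk hn
      have hklt : (k : Int) < (cs.length : Int) - 1 := by omega
      rw [PySem.List.pyRange_one_cons hklt]
      have hk1 : k + 1 < cs.length := by omega
      rw [List.foldl_cons]
      have hget : PySem.List.pyGet? cs (k : Int) = some cs[k] := by
        rw [PySem.List.pyGet?_natCast]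
        exact List.getElem?_eq_getElem hk
      have hget1 : PySem.List.pyGet? cs ((k : Int) + 1) = some cs[k + 1] := by
        rw [show ((k : Int) + 1) = ((k + 1 : Nat) : Int) by push_cast; ring]
        rw [PySem.List.pyGet?_natCast]
        exact List.getElem?_eq_getElem hk1
      have hstep : pvStepA cs acc (k : Int)
          = acc ++ ([cs[k]] ++ (if cs[k] = '(' ∨ cs[k + 1] = ')' ∨ cs[k] = '<' ∨ cs[k] = '-' ∨ cs[k] = '!'
              then [] else [' '])) := by
        rw [pvStepA, hget, hget1]
        simp only [Option.map_some, Option.getD_some]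
        split_ifs <;> simp
      rw [hstep]
      rw [show ((k : Int) + 1) = ((k + 1 : Nat) : Int) by push_cast; ring]
      rw [ihn (k + 1) _ hk1 (by omega)]
      have hdropk : cs.drop k = cs[k] :: cs.drop (k + 1) := List.drop_eq_getElem_cons hk
      have hdropk1 : cs.drop (k + 1) = cs[k + 1] :: cs.drop (k + 2) := List.drop_eq_getElem_cons hk1
      rw [hdropk, hdropk1]
      rw [show pvGoA (cs[k] :: cs[k + 1] :: cs.drop (k + 2))
            = cs[k] :: ((if cs[k] = '(' ∨ cs[k + 1] = ')' ∨ cs[k] = '<' ∨ cs[k] = '-' ∨ cs[k] = '!'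
                then [] else [' ']) ++ pvGoA (cs[k + 1] :: cs.drop (k + 2))) from rfl]
      simp

-- members of the stripped list are not spaces
theorem pvFilterNoSpace (l : List Char) : ∀ c ∈ l.filter (fun x => x != ' '), c ≠ ' ' := by
  intro c hc
  have := List.of_mem_filter hc
  simpa using this

-- ===== VERDICT (by name: the statement is the Claim_ definition above) =====
theorem make_pretty_spec : Claim_equal_make_pretty := by
  intro s _ hpre
  unfold Spec_make_pretty
  have hne : s.toList.filter (fun x => x != ' ') ≠ [] := hpre
  have hwf0 : pvWF (pvPairs (s.toList.filter (fun x => x != ' '))) :=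
    pvWF_pairs _ (pvFilterNoSpace s.toList)
  have hwf1 := pvWF_mapL '(' _ hwf0
  have hwf2 := pvWF_mapL '<' _ hwf1
  have hwf3 := pvWF_mapL '-' _ hwf2
  have hwf4 := pvWF_mapL '!' _ hwf3
  have hB : make_pretty_alt s = String.ofList (pvGoA (s.toList.filter (fun x => x != ' '))) := by
    rw [make_pretty_alt]
    rw [pvStrip, pvJoin]
    rw [pvReplaceL '(' (by decide) _ hwf0]
    rw [pvReplaceL '<' (by decide) _ hwf1]
    rw [pvReplaceL '-' (by decide) _ hwf2]
    rw [pvReplaceL '!' (by decide) _ hwf3]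
    rw [pvReplaceR _ hwf4]
    rw [pvChain]
  have hA : make_pretty s = String.ofList (pvGoA (s.toList.filter (fun x => x != ' '))) := by
    rw [make_pretty]
    have h0 : 0 < (s.toList.filter (fun x => x != ' ')).length := by
      cases h : s.toList.filter (fun x => x != ' ') with
      | nil => exact absurd h hne
      | cons x t => simp
    have := pvLoopA (s.toList.filter (fun x => x != ' '))
      ((s.toList.filter (fun x => x != ' ')).length - 1 - 0) 0 [] h0 rfl
    simp only [Nat.cast_zero, List.drop_zero, List.nil_append] at this
    rw [this]
  rw [hA, hB]

@[simp] theorem make_pretty_raises : Claim_raises_make_pretty := by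
  unfold Claim_raises_make_pretty
  refine ⟨?_, by decide⟩
  intro s _ hall
  unfold Raises_make_pretty at hall
  unfold Pre_make_pretty
  simp only [ne_eq, not_not]
  rw [List.filter_eq_nil_iff]
  intro c hc
  have := (List.all_eq_true.mp hall) c hc
  simpa using this
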